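-- pv_equiv track=rewrite | github.com/RGlodAkshat/HushhVoice | backend/agents/email_assistant/helper_functions.py | trim_email_fields
-- ===== SOURCE A (Python) =====
-- from typing import List, Dict
--
-- def trim_email_fields(emails: List[Dict[str, str]]) -> List[Dict[str, str]]:
--     """Ensure only safe, compact fields are forwarded to the model."""
--     out = []
--     for e in emails:
--         out.append({
--             "from": e.get("from", "")[:300],
--             "subject": e.get("subject", "")[:300],
--             "date": e.get("date", "")[:64],
--             "snippet": e.get("snippet", "")[:1500],  # keep snippets compact
--         })
--     return out
-- ===== SOURCE B (Python) =====
-- from typing import List, Dict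
--
-- def trim_email_fields(emails: List[Dict[str, str]]) -> List[Dict[str, str]]:
--     """Ensure only safe, compact fields are forwarded to the model.
--
--     Column-oriented: extract each field as its own truncated column in a
--     separate pass, then zip the columns back into row dicts.
--     """
--     froms = [e.get("from", "")[:300] for e in emails]
--     subjects = [e.get("subject", "")[:300] for e in emails]
--     dates = [e.get("date", "")[:64] for e in emails]
--     snippets = [e.get("snippet", "")[:1500] for e in emails]
--     return [
--         {"from": f, "subject": s, "date": d, "snippet": sn}
--         for f, s, d, sn in zip(froms, subjects, dates, snippets)
--     ]
-- ===== Notes on version B (the rewrite author's own statement) =====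
-- stated objective: alternative
-- what changed: Replaces A's single row-wise accumulator loop by a column-oriented (struct-of-arrays) pipeline: four staged passes build one truncated column per field, and a final zip pass reassembles the rows.
import Mathlib
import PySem

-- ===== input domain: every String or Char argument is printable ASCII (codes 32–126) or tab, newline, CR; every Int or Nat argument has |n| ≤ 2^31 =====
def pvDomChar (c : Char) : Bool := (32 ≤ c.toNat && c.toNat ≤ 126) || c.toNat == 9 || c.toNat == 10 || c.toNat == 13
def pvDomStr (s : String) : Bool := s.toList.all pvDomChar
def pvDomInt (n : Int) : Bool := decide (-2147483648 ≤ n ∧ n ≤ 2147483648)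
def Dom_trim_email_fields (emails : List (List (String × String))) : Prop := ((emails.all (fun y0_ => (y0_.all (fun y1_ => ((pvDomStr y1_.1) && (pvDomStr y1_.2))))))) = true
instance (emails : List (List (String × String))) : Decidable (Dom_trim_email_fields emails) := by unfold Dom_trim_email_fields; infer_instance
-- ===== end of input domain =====

-- B trades A's single row-wise accumulator loop for a column-oriented pipeline (four staged
-- per-field passes, then a zip that reassembles rows): an alternative decomposition, same cost.

-- ===== PORT A =====
def trim_email_fields (emails : List (List (String × String))) : List (List (String × String)) :=
  emails.foldl (fun out e =>
    out ++ [[("from", PySem.Str.slice ((PySem.Dict.mk e).getD "from" "") none (some 300)),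
             ("subject", PySem.Str.slice ((PySem.Dict.mk e).getD "subject" "") none (some 300)),
             ("date", PySem.Str.slice ((PySem.Dict.mk e).getD "date" "") none (some 64)),
             ("snippet", PySem.Str.slice ((PySem.Dict.mk e).getD "snippet" "") none (some 1500))]]) []

-- ===== PORT B =====
-- one truncated column per field (Source B's four staged list comprehensions)
def pvColumn (field : String) (limit : Int) (emails : List (List (String × String))) : List String :=
  emails.map (fun e => PySem.Str.slice ((PySem.Dict.mk e).getD field "") none (some limit))

def trim_email_fields_alt (emails : List (List (String × String))) : List (List (String × String)) :=
  let froms := pvColumn "from" 300 emails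
  let subjects := pvColumn "subject" 300 emails
  let dates := pvColumn "date" 64 emails
  let snippets := pvColumn "snippet" 1500 emails
  (((froms.zip subjects).zip dates).zip snippets).map
    (fun q => [("from", q.1.1.1), ("subject", q.1.1.2), ("date", q.1.2), ("snippet", q.2)])

-- ===== PRECONDITION & SPEC =====
def Spec_trim_email_fields (emails : List (List (String × String))) (out : List (List (String × String))) : Prop := out = trim_email_fields_alt emails
instance (emails : List (List (String × String))) (out : List (List (String × String))) : Decidable (Spec_trim_email_fields emails out) := by unfold Spec_trim_email_fields; infer_instance

-- ===== CLAIM =====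
def Claim_equal_trim_email_fields : Prop := ∀ (emails : List (List (String × String))), Dom_trim_email_fields emails → Spec_trim_email_fields emails (trim_email_fields emails)

-- ===== LEMMAS AND PROOFS =====
-- A's append-accumulator loop is a map
theorem foldl_append_map {α β : Type} (f : α → β) (l : List α) (acc : List β) :
    l.foldl (fun out e => out ++ [f e]) acc = acc ++ l.map f := by
  induction l generalizing acc with
  | nil => simp
  | cons x xs ih => simp [List.foldl, ih]

-- zipping four maps over the same list is a map of the row-builder
theorem zip4_map_eq {α β₁ β₂ β₃ β₄ γ : Type}
    (f₁ : α → β₁) (f₂ : α → β₂) (f₃ : α → β₃) (f₄ : α → β₄)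
    (g : ((β₁ × β₂) × β₃) × β₄ → γ) (l : List α) :
    ((((l.map f₁).zip (l.map f₂)).zip (l.map f₃)).zip (l.map f₄)).map g
      = l.map (fun e => g (((f₁ e, f₂ e), f₃ e), f₄ e)) := by
  induction l with
  | nil => simp
  | cons x xs ih => simp [ih]

-- ===== VERDICT =====
theorem trim_email_fields_spec : Claim_equal_trim_email_fields := by
  intro emails _hdom
  unfold Spec_trim_email_fields trim_email_fields trim_email_fields_alt pvColumn
  rw [foldl_append_map, zip4_map_eq]
  simp
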